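-- pv_equiv track=rewrite | github.com/code-of-kpp/django-heavy-smoke | heavy_smoke/tests.py | urls_gen
-- ===== SOURCE A (Python) =====
-- def urls_gen(url, args):
--     if not args:
--         yield url
--     else:
--         pattern, vals = args[0]
--         for val in vals:
--             new_url = url.replace(pattern, str(val))
--             for gen_url in urls_gen(new_url, args[1:]):
--                 if '\.' in gen_url:
--                     yield gen_url.replace('\.', '.')
--                 else:
--                     yield gen_url
-- ===== SOURCE B (Python) =====
-- def urls_gen(url, args):
--     # Combinator style: each (pattern, vals) level is an expansion transformer;
--     # compose them right to left into a single function, then apply it to url.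
--     def level(pattern, vals, inner):
--         return lambda u: [g.replace('\.', '.')
--                           for v in vals
--                           for g in inner(u.replace(pattern, str(v)))]
--
--     expand = lambda u: [u]
--     for pattern, vals in reversed(args):
--         expand = level(pattern, vals, expand)
--     yield from expand(url)
-- ===== Notes on version B (the rewrite author's own statement) =====
-- stated objective: alternative
-- what changed: Replaced the recursive generator by an iterative right-to-left fold that composes one expansion closure per (pattern, vals) level and applies the composed function to the url; each level's closure does the substitution and the '\.'->'.' cleanup that A's corresponding recursion frame performs.
import Mathlib
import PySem

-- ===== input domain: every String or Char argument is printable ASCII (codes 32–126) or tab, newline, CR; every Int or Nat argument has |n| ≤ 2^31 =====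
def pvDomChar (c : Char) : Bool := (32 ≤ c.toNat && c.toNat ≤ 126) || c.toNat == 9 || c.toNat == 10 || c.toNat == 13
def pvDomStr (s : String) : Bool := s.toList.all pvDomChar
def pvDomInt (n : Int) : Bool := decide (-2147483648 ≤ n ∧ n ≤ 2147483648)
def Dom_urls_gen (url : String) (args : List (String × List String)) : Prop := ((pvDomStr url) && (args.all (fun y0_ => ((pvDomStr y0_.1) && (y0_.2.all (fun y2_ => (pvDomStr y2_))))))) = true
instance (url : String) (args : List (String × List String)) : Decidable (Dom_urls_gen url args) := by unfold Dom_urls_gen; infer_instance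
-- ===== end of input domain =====

-- B recasts A's recursive generator as an iterative right-to-left fold composing one expansion
-- closure per (pattern, vals) level (objective: alternative decomposition, same cost).

-- ===== PORT A =====
def urls_gen (url : String) (args : List (String × List String)) : List String :=
  match args with
  | [] => [url]
  | (pattern, vals) :: rest =>
    vals.foldl (fun acc val =>
      let new_url := PySem.Str.replace url pattern val
      acc ++ (urls_gen new_url rest).map (fun gen_url =>
        if PySem.Str.isIn "\\." gen_url then PySem.Str.replace gen_url "\\." "." else gen_url)) []

-- ===== PORT B =====
-- level(pattern, vals, inner): one (pattern, vals) level's expansion closure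
def pvLevel (pattern : String) (vals : List String) (inner : String → List String) :
    String → List String :=
  fun u => vals.flatMap (fun v =>
    (inner (PySem.Str.replace u pattern v)).map (fun g => PySem.Str.replace g "\\." "."))

def urls_gen_alt (url : String) (args : List (String × List String)) : List String :=
  (args.reverse.foldl (fun expand pv => pvLevel pv.1 pv.2 expand) (fun u => [u])) url

-- ===== PRECONDITION & SPEC =====
def Spec_urls_gen (url : String) (args : List (String × List String)) (out : List String) : Prop := out = urls_gen_alt url args
instance (url : String) (args : List (String × List String)) (out : List String) : Decidable (Spec_urls_gen url args out) := by unfold Spec_urls_gen; infer_instance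

-- ===== CLAIM (what is proved, stated in full; the proofs are below) =====
def Claim_equal_urls_gen : Prop := ∀ (url : String) (args : List (String × List String)), Dom_urls_gen url args → Spec_urls_gen url args (urls_gen url args)

-- ===== LEMMAS AND PROOFS =====

-- replace is the identity when the (nonempty) pattern does not occur
theorem pvReplaceGo_no_occ (old new : List Char) :
    ∀ (fuel : Nat) (l acc : List Char), ¬ old <:+: l →
      PySem.Chars.replace.go old new fuel l acc = acc.reverse ++ l := by
  intro fuel
  induction fuel with
  | zero => intro l acc _; rfl
  | succ n ih =>
    intro l acc h
    match l with
    | [] => simp [PySem.Chars.replace.go]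
    | c :: t =>
      have hpre : old.isPrefixOf (c :: t) = false := by
        cases hb : old.isPrefixOf (c :: t) with
        | false => rfl
        | true => exact absurd ((List.isPrefixOf_iff_prefix.mp hb).isInfix) h
      have ht : ¬ old <:+: t := fun hinf => h (hinf.trans (List.suffix_cons c t).isInfix)
      simp only [PySem.Chars.replace.go, hpre, Bool.false_eq_true, if_false]
      rw [ih t (c :: acc) ht]
      simp

theorem pvReplace_no_occ (s old new : String) (hold : old.toList ≠ [])
    (h : PySem.Str.isIn old s = false) : PySem.Str.replace s old new = s := by
  have hinf : ¬ old.toList <:+: s.toList :=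
    (PySem.Chars.isIn_eq_false_iff old.toList s.toList).mp (by simpa [PySem.Str.isIn] using h)
  have hl : (PySem.Str.replace s old new).toList = s.toList := by
    rw [PySem.Str.toList_replace, PySem.Chars.replace,
      if_neg (by simpa [List.isEmpty_iff] using hold),
      pvReplaceGo_no_occ _ _ _ _ _ hinf]
    rfl
  exact String.toList_inj.mp hl

-- A's guarded cleanup equals the unconditional one
theorem pvCleanIf (g : String) :
    (if PySem.Str.isIn "\\." g then PySem.Str.replace g "\\." "." else g)
      = PySem.Str.replace g "\\." "." := by
  by_cases h : PySem.Str.isIn "\\." g = true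
  · rw [if_pos h]
  · rw [if_neg h]
    exact (pvReplace_no_occ g "\\." "." (by decide)
      (by simpa using Bool.not_eq_true _ |>.mp h)).symm

-- one unfolding step of B's composed closure
theorem pvAlt_cons (p : String) (vs : List String) (rest : List (String × List String)) (url : String) :
    urls_gen_alt url ((p, vs) :: rest)
      = vs.flatMap (fun v =>
          (urls_gen_alt (PySem.Str.replace url p v) rest).map
            (fun g => PySem.Str.replace g "\\." ".")) := by
  unfold urls_gen_alt
  rw [List.reverse_cons, List.foldl_append]
  rfl

-- the equality itself, unconditional
theorem pvMain (args : List (String × List String)) :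
    ∀ url, urls_gen url args = urls_gen_alt url args := by
  induction args with
  | nil => intro url; rfl
  | cons hd rest ih =>
    intro url
    obtain ⟨p, vs⟩ := hd
    rw [urls_gen, PySem.List.foldl_append_eq_flatMap, pvAlt_cons]
    simp only [List.nil_append, pvCleanIf, ih]

-- ===== VERDICT (by name: the statement is the Claim_ definition above) =====
theorem urls_gen_spec : Claim_equal_urls_gen := by
  intro url args _
  exact pvMain args url
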